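-- pv_equiv track=rewrite | github.com/JuanBernaal/universidad | I Semester/Introducción a la programación/python/tarea4.py | factAcumInv
-- ===== SOURCE A (Python) =====
-- def factAcumInv(N):
--     f = 1
--     listaFactorial = []
--     listaFactorialInvertida = []
--     for i in range(1, N + 1):
--
--         f *= i
--         listaFactorial.append(f)
--
--
--     for j in range(N-1,-1,-1):
--         listaFactorialInvertida.append(listaFactorial[j])
--
--
--     return listaFactorialInvertida
-- ===== SOURCE B (Python) =====
-- def factAcumInv(N):
--     if N <= 0:
--         return []
--     f = 1
--     for i in range(1, N + 1):
--         f *= i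
--     out = []
--     for k in range(N, 0, -1):
--         out.append(f)
--         f //= k
--     return out
-- ===== Notes on version B (the rewrite author's own statement) =====
-- stated objective: alternative
-- what changed: B computes N! once and then emits the reversed factorial list directly by dividing down (f //= k for k = N..1), instead of building the ascending factorial list and reversing it with a second index loop.
import Mathlib
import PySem

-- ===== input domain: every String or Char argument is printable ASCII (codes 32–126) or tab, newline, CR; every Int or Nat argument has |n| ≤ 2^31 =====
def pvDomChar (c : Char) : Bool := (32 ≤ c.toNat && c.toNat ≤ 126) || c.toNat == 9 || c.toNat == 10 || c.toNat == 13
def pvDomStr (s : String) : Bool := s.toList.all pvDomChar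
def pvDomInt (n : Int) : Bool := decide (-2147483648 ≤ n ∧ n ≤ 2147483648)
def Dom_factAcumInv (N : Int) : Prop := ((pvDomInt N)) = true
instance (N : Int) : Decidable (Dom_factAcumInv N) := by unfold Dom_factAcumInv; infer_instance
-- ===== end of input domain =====

-- B builds the reversed factorial list directly, dividing N! down, instead of
-- building the ascending list and reversing it with a second index loop (objective: alternative).

-- ===== PORT A =====
def factAcumInv (N : Int) : List Int :=
  let st := (PySem.List.pyRange 1 (N + 1) 1).foldl
    (fun (st : Int × List Int) i => (st.1 * i, st.2 ++ [st.1 * i])) (1, ([] : List Int))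
  (PySem.List.pyRange (N - 1) (-1) (-1)).foldl
    (fun acc j => acc ++ [PySem.List.pyGetD st.2 j 0]) ([] : List Int)

-- ===== PORT B =====
def factAcumInv_alt (N : Int) : List Int :=
  if N ≤ 0 then []
  else
    let f := (PySem.List.pyRange 1 (N + 1) 1).foldl (fun a i => a * i) 1
    ((PySem.List.pyRange N 0 (-1)).foldl
      (fun (st : Int × List Int) k => (PySem.Int.floordiv st.1 k, st.2 ++ [st.1]))
      (f, ([] : List Int))).2

-- ===== PRECONDITION & SPEC =====
def Spec_factAcumInv (N : Int) (out : List Int) : Prop := out = factAcumInv_alt N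
instance (N : Int) (out : List Int) : Decidable (Spec_factAcumInv N out) := by unfold Spec_factAcumInv; infer_instance

-- ===== CLAIM (what is proved, stated in full; the proofs are below) =====
def Claim_equal_factAcumInv : Prop := ∀ (N : Int), Dom_factAcumInv N → Spec_factAcumInv N (factAcumInv N)

-- ===== LEMMAS AND PROOFS =====

-- A's first loop: factorial accumulator and ascending factorial list.
lemma loopA (n : Nat) :
    (PySem.List.pyRange 1 ((n : Int) + 1) 1).foldl
      (fun (st : Int × List Int) i => (st.1 * i, st.2 ++ [st.1 * i])) (1, ([] : List Int))
    = ((Nat.factorial n : Int), (List.range n).map (fun k => ((Nat.factorial (k + 1) : Nat) : Int))) := by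
  induction n with
  | zero => simp [PySem.List.pyRange_one_eq_nil, Nat.factorial]
  | succ m ih =>
    have h : ((m + 1 : Nat) : Int) + 1 = ((m : Int) + 1) + 1 := by push_cast; ring
    rw [h, PySem.List.pyRange_one_succ_right (by omega), List.foldl_append, ih]
    simp [List.range_succ, Nat.factorial_succ]
    ring

-- B's product loop computes the same factorial.
lemma loopBprod (n : Nat) :
    (PySem.List.pyRange 1 ((n : Int) + 1) 1).foldl (fun a i => a * i) 1
    = ((Nat.factorial n : Nat) : Int) := by
  induction n with
  | zero => simp [PySem.List.pyRange_one_eq_nil, Nat.factorial]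
  | succ m ih =>
    have h : ((m + 1 : Nat) : Int) + 1 = ((m : Int) + 1) + 1 := by push_cast; ring
    rw [h, PySem.List.pyRange_one_succ_right (by omega), List.foldl_append, ih]
    simp [Nat.factorial_succ]
    ring

-- B's divide-down loop emits the reversed factorial list.
lemma loopB (n : Nat) (acc : List Int) :
    ((PySem.List.pyRange (n : Int) 0 (-1)).foldl
      (fun (st : Int × List Int) k => (PySem.Int.floordiv st.1 k, st.2 ++ [st.1]))
      (((Nat.factorial n : Nat) : Int), acc)).2
    = acc ++ ((List.range n).map (fun k => ((Nat.factorial (k + 1) : Nat) : Int))).reverse := by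
  induction n generalizing acc with
  | zero => simp [PySem.List.pyRange_neg_one_eq_nil]
  | succ m ih =>
    rw [PySem.List.pyRange_neg_one_cons (by positivity)]
    have hdiv : PySem.Int.floordiv ((Nat.factorial (m + 1) : Nat) : Int) ((m + 1 : Nat) : Int)
        = ((Nat.factorial m : Nat) : Int) := by
      rw [PySem.Int.floordiv_natCast]
      congr 1
      rw [Nat.factorial_succ, Nat.mul_div_cancel_left _ (Nat.succ_pos m)]
    simp only [List.foldl_cons]
    have hm : ((m + 1 : Nat) : Int) - 1 = (m : Int) := by push_cast; ring
    rw [show (((m + 1 : Nat) : Int)) = ((m : Nat) : Int) + 1 by push_cast; ring] at hdiv ⊢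
    rw [show ((m : Nat) : Int) + 1 - 1 = ((m : Nat) : Int) by ring]
    rw [hdiv, ih]
    simp [List.range_succ]

-- A's second loop applied to a list xs reverses it.
lemma loopArev (xs : List Int) :
    (PySem.List.pyRange ((xs.length : Int) - 1) (-1) (-1)).foldl
      (fun acc j => acc ++ [PySem.List.pyGetD xs j 0]) ([] : List Int)
    = xs.reverse := by
  rw [PySem.List.pyRange_neg_one_eq_reverse]
  have h1 : (-1 : Int) + 1 = 0 := by ring
  have h2 : ((xs.length : Int) - 1) + 1 = (xs.length : Int) := by ring
  rw [h1, h2]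
  rw [PySem.List.foldl_append_singleton_eq_map]
  rw [List.map_reverse]
  rw [PySem.List.map_pyGetD_pyRange_zero']
  simp

theorem factAcumInv_spec : Claim_equal_factAcumInv := by
  intro N _
  unfold Spec_factAcumInv factAcumInv factAcumInv_alt
  by_cases hN : N ≤ 0
  · simp only [hN, if_pos]
    rw [PySem.List.pyRange_neg_one_eq_nil (by omega)]
    simp
  · simp only [hN, if_false]
    obtain ⟨n, rfl⟩ : ∃ n : Nat, N = (n : Int) := ⟨N.toNat, (Int.toNat_of_nonneg (by omega)).symm⟩
    rw [loopA n, loopBprod n]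
    have := loopArev ((List.range n).map (fun k => ((Nat.factorial (k + 1) : Nat) : Int)))
    simp only [List.length_map, List.length_range] at this
    simp only []
    rw [this, loopB n []]
    simp
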